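-- pv_equiv track=rewrite | github.com/ndrw1221/Data-Science | Lab02/Data Science Lab02.py | find_reverse_pair
-- ===== SOURCE A (Python) =====
-- def find_reverse_pair(word_list, case_sensitive = False):
--     reverse_pair_list = []
--
--     if not case_sensitive:
--         word_list = [word.lower() for word in word_list]
--
--     for word in word_list:
--         if word[::-1] in word_list[word_list.index(word) + 1::]:
--             reverse_pair_list.append([word, word[::-1]])
--
--     return reverse_pair_list
-- ===== SOURCE B (Python) =====
-- def find_reverse_pair(word_list, case_sensitive=False):
--     words = word_list if case_sensitive else [w.lower() for w in word_list]
--     # Single pass: each occurrence certifies its (already seen) reverse,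
--     # then a comprehension emits every occurrence of a certified word.
--     seen = set()
--     good = set()
--     for v in words:
--         r = v[::-1]
--         if r in seen:
--             good.add(r)
--         seen.add(v)
--     return [[w, w[::-1]] for w in words if w in good]
-- ===== Notes on version B (the rewrite author's own statement) =====
-- stated objective: faster
-- what changed: Instead of each word scanning forward for its reverse (list.index plus a slice membership scan per word), B makes one pass in which every occurrence marks its reverse as qualified when that reverse was seen earlier (a seen-set / good-set certification in the opposite direction), then emits pairs for occurrences of qualified words.
import Mathlib
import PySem

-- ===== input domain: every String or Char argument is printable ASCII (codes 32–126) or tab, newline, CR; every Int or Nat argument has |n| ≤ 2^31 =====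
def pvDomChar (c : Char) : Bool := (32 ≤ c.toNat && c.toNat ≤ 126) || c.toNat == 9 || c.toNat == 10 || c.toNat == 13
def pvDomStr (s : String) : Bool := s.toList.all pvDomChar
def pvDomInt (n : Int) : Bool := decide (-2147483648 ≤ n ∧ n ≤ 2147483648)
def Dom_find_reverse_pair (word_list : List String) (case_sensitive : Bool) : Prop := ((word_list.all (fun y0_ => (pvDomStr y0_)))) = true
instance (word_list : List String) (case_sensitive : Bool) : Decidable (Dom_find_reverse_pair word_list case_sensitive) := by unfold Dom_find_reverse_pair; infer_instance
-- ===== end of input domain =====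

-- B replaces A's per-word forward scan (list.index + slice membership per word) by one pass in which
-- each occurrence certifies its already-seen reverse into a 'good' set, then a comprehension emits the pairs (faster).

-- ===== PORT A =====
def find_reverse_pair (word_list : List String) (case_sensitive : Bool) : List (List String) :=
  let ws := if !case_sensitive then word_list.map PySem.Str.lower else word_list
  ws.foldl (fun acc word =>
    -- word[::-1]: step -1 ≠ 0, so slice? is always some
    let rev := (PySem.Str.slice? word none none (-1)).getD ""
    -- word_list.index(word): word is drawn from ws, so index? is always some
    let i := (PySem.List.index? ws word).getD 0
    if (PySem.List.slice ws (some ((i : Int) + 1)) none).contains rev then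
      acc ++ [[word, rev]]
    else acc) []

-- ===== PORT B =====
def find_reverse_pair_alt (word_list : List String) (case_sensitive : Bool) : List (List String) :=
  let ws := if case_sensitive then word_list else word_list.map PySem.Str.lower
  let st := ws.foldl
    (fun (p : PySem.Set String × PySem.Set String) v =>
      -- v[::-1]: step -1 ≠ 0, so slice? is always some
      let r := (PySem.Str.slice? v none none (-1)).getD ""
      (PySem.Set.add p.1 v, if p.1.contains r then PySem.Set.add p.2 r else p.2))
    (PySem.Set.empty, PySem.Set.empty)
  -- [[w, w[::-1]] for w in words if w in good]
  (ws.filter (fun w => st.2.contains w)).map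
    (fun w => [w, (PySem.Str.slice? w none none (-1)).getD ""])

-- ===== PRECONDITION & SPEC =====
def Spec_find_reverse_pair (word_list : List String) (case_sensitive : Bool) (out : List (List String)) : Prop := out = find_reverse_pair_alt word_list case_sensitive
instance (word_list : List String) (case_sensitive : Bool) (out : List (List String)) : Decidable (Spec_find_reverse_pair word_list case_sensitive out) := by unfold Spec_find_reverse_pair; infer_instance

-- ===== CLAIM (what is proved, stated in full; the proofs are below) =====
def Claim_equal_find_reverse_pair : Prop := ∀ (word_list : List String) (case_sensitive : Bool), Dom_find_reverse_pair word_list case_sensitive → Spec_find_reverse_pair word_list case_sensitive (find_reverse_pair word_list case_sensitive)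

-- ===== LEMMAS AND PROOFS =====

-- w[::-1] as a pure function
theorem rev_expr (v : String) :
    (PySem.Str.slice? v none none (-1)).getD "" = String.ofList v.toList.reverse := by
  rw [PySem.Str.slice?_none_none_neg_one]; rfl

theorem rev_invol (v : String) :
    String.ofList (String.ofList v.toList.reverse).toList.reverse = v := by
  simp

theorem rev_eq_comm (v w : String) :
    v = String.ofList w.toList.reverse ↔ w = String.ofList v.toList.reverse := by
  constructor <;> (intro h; subst h; rw [rev_invol])

theorem mem_drop_iff {xs : List String} {j : Nat} {v : String} :
    v ∈ xs.drop j ↔ ∃ i, j ≤ i ∧ xs[i]? = some v := by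
  constructor
  · intro h
    rw [List.mem_iff_getElem] at h
    obtain ⟨k, hk, hv⟩ := h
    refine ⟨j + k, by omega, ?_⟩
    rw [← List.getElem?_drop]
    exact List.getElem?_eq_getElem hk ▸ congrArg some hv
  · rintro ⟨i, hji, hv⟩
    have : (xs.drop j)[i - j]? = some v := by
      rw [List.getElem?_drop]; rwa [show j + (i - j) = i by omega]
    exact List.mem_of_getElem? this

theorem mem_take_iff {xs : List String} {j : Nat} {v : String} :
    v ∈ xs.take j ↔ ∃ i, i < j ∧ xs[i]? = some v := by
  rw [List.mem_take_iff_getElem]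
  constructor
  · rintro ⟨i, hi, hv⟩
    simp only [lt_min_iff] at hi
    exact ⟨i, hi.1, by rw [List.getElem?_eq_getElem hi.2, hv]⟩
  · rintro ⟨i, hij, hv⟩
    have hi : i < xs.length := (List.getElem?_eq_some_iff.mp hv).1
    exact ⟨i, by omega, by simpa [List.getElem?_eq_getElem hi] using hv⟩

-- invariant of B's single pass: w is in the good set iff some occurrence of rev(w)
-- has an occurrence of w strictly before it (or w was already seen / already good)
theorem good_mem (l : List String) :
    ∀ (s g : PySem.Set String) (w : String),
    w ∈ (l.foldl
      (fun (p : PySem.Set String × PySem.Set String) v =>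
        let r := (PySem.Str.slice? v none none (-1)).getD ""
        (PySem.Set.add p.1 v, if p.1.contains r then PySem.Set.add p.2 r else p.2))
      (s, g)).2
    ↔ w ∈ g ∨ ∃ j, l[j]? = some (String.ofList w.toList.reverse) ∧ (w ∈ s ∨ w ∈ l.take j) := by
  induction l with
  | nil => intro s g w; simp
  | cons v t ih =>
    intro s g w
    rw [List.foldl_cons]
    have hstep : (let r := (PySem.Str.slice? v none none (-1)).getD ""
          ((s, g).1.add v, if (s, g).1.contains r then (s, g).2.add r else (s, g).2))
        = (PySem.Set.add s v,
            if s.contains (String.ofList v.toList.reverse)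
            then PySem.Set.add g (String.ofList v.toList.reverse) else g) := by
      simp only [rev_expr]
    rw [hstep, ih]
    have hg' : w ∈ (if s.contains (String.ofList v.toList.reverse)
          then PySem.Set.add g (String.ofList v.toList.reverse) else g)
        ↔ w ∈ g ∨ (v = String.ofList w.toList.reverse ∧ w ∈ s) := by
      split_ifs with hc
      · rw [PySem.Set.mem_add]
        constructor
        · rintro (h | h)
          · exact Or.inl h
          · subst h
            refine Or.inr ⟨(rev_eq_comm _ _).mpr rfl, ?_⟩
            exact List.contains_iff_mem.mp hc
        · rintro (h | ⟨hv, _⟩)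
          · exact Or.inl h
          · exact Or.inr ((rev_eq_comm _ _).mp hv)
      · constructor
        · exact Or.inl
        · rintro (h | ⟨hv, hs⟩)
          · exact h
          · exact absurd (List.contains_iff_mem.mpr (((rev_eq_comm _ _).mp hv) ▸ hs)) (by simpa using hc)
    rw [hg']
    constructor
    · rintro ((h | ⟨hv, hs⟩) | ⟨j, hj, hc⟩)
      · exact Or.inl h
      · exact Or.inr ⟨0, by simp [hv], Or.inl hs⟩
      · refine Or.inr ⟨j + 1, by simpa using hj, ?_⟩
        rcases hc with hc | hc
        · rcases (PySem.Set.mem_add _ _ _).mp hc with h | h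
          · exact Or.inl h
          · exact Or.inr (by simp [h])
        · exact Or.inr (by simp [List.take_succ_cons, hc])
    · rintro (h | ⟨j, hj, hc⟩)
      · exact Or.inl (Or.inl h)
      · cases j with
        | zero =>
          simp only [List.getElem?_cons_zero, Option.some.injEq] at hj
          refine Or.inl (Or.inr ⟨hj, ?_⟩)
          rcases hc with hc | hc
          · exact hc
          · simp at hc
        | succ j =>
          simp only [List.getElem?_cons_succ] at hj
          refine Or.inr ⟨j, hj, ?_⟩
          rcases hc with hc | hc
          · exact Or.inl ((PySem.Set.mem_add _ _ _).mpr (Or.inl hc))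
          · rw [List.take_succ_cons, List.mem_cons] at hc
            rcases hc with hc | hc
            · exact Or.inl ((PySem.Set.mem_add _ _ _).mpr (Or.inr hc))
            · exact Or.inr hc

-- per-element equality of the two qualification tests, for w drawn from ws
theorem cond_eq (ws : List String) (w : String) (hw : w ∈ ws) :
    (PySem.List.slice ws (some ((((PySem.List.index? ws w).getD 0 : Nat) : Int) + 1)) none).contains
        ((PySem.Str.slice? w none none (-1)).getD "")
    = ((ws.foldl
        (fun (p : PySem.Set String × PySem.Set String) v =>
          let r := (PySem.Str.slice? v none none (-1)).getD ""
          (PySem.Set.add p.1 v, if p.1.contains r then PySem.Set.add p.2 r else p.2))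
        (PySem.Set.empty, PySem.Set.empty)).2.contains w) := by
  rcases Option.isSome_iff_exists.mp ((PySem.List.index?_isSome_iff ws w).mpr hw) with ⟨k, hk⟩
  obtain ⟨hklen, hkw, hkmin⟩ := PySem.List.getElem_of_index?_eq_some hk
  rw [hk]
  simp only [Option.getD_some]
  rw [rev_expr]
  have hcast : ((k : Int) + 1) = ((k + 1 : Nat) : Int) := by push_cast; ring
  rw [hcast, PySem.List.slice_from_natCast]
  rw [Bool.eq_iff_iff, List.contains_iff_mem, PySem.Set.contains_iff, good_mem]
  simp only [PySem.Set.empty, List.not_mem_nil, false_or]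
  rw [mem_drop_iff]
  constructor
  · rintro ⟨i, hji, hv⟩
    refine ⟨i, hv, mem_take_iff.mpr ⟨k, by omega, ?_⟩⟩
    rw [List.getElem?_eq_getElem hklen, hkw]
  · rintro ⟨j, hj, hc⟩
    refine ⟨j, ?_, hj⟩
    obtain ⟨i, hij, hiv⟩ := mem_take_iff.mp hc
    have hi : i < ws.length := (List.getElem?_eq_some_iff.mp hiv).1
    have hiw : ws[i] = w := by
      have := List.getElem?_eq_getElem hi ▸ hiv
      simpa using this
    have : ¬ i < k := fun hik => hkmin i hik hiw
    omega

-- ===== VERDICT (by name: the statement is the Claim_ definition above) =====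
theorem find_reverse_pair_spec : Claim_equal_find_reverse_pair := by
  intro word_list case_sensitive _
  unfold Spec_find_reverse_pair find_reverse_pair find_reverse_pair_alt
  have hws : (if !case_sensitive then word_list.map PySem.Str.lower else word_list)
      = (if case_sensitive then word_list else word_list.map PySem.Str.lower) := by
    cases case_sensitive <;> rfl
  rw [hws]
  set ws := if case_sensitive then word_list else word_list.map PySem.Str.lower with hdef
  show (ws.foldl (fun acc word =>
        if (PySem.List.slice ws (some ((((PySem.List.index? ws word).getD 0 : Nat) : Int) + 1)) none).contains
            ((PySem.Str.slice? word none none (-1)).getD "")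
        then acc ++ [[word, (PySem.Str.slice? word none none (-1)).getD ""]] else acc) [])
    = (ws.filter (fun w =>
        ((ws.foldl
          (fun (p : PySem.Set String × PySem.Set String) v =>
            let r := (PySem.Str.slice? v none none (-1)).getD ""
            (PySem.Set.add p.1 v, if p.1.contains r then PySem.Set.add p.2 r else p.2))
          (PySem.Set.empty, PySem.Set.empty)).2.contains w))).map
        (fun w => [w, (PySem.Str.slice? w none none (-1)).getD ""])
  rw [PySem.List.foldl_append_if]
  rw [List.nil_append]
  congr 1
  apply List.filter_congr
  intro w hw
  exact cond_eq ws w hw
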